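-- pv_equiv track=rewrite | github.com/oernster/crankthecode | app/domain/tags.py | primary_layer_slug_from_tags
-- ===== SOURCE A (Python) =====
-- def normalize_layer_slug(raw_slug: str) -> str:
--     """Normalize a `layer:` slug into kebab-case."""
--
--     raw = (raw_slug or "").strip().lower()
--     if not raw:
--         return ""
--
--     if (
--         raw.replace("-", "").isalnum()
--         and "--" not in raw
--         and not raw.startswith("-")
--         and not raw.endswith("-")
--     ):
--         return raw
--
--     out_chars: list[str] = []
--     prev_dash = False
--     for ch in raw:
--         if ch.isalnum():
--             out_chars.append(ch)
--             prev_dash = False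
--             continue
--         if ch in {" ", "_", "-"}:
--             if not prev_dash and out_chars:
--                 out_chars.append("-")
--                 prev_dash = True
--             continue
--
--     return "".join(out_chars).strip("-")
--
-- def primary_layer_slug_from_tags(tags: list[str]) -> str | None:
--     """Return the first `layer:` slug in the original tag order (if any)."""
--
--     for t in tags or []:
--         raw = (t or "").strip()
--         if not raw.lower().startswith("layer:"):
--             continue
--         tail = raw.split(":", 1)[1].strip()
--         slug = normalize_layer_slug(tail)
--         if slug:
--             return slug
--     return None
-- ===== SOURCE B (Python) =====
-- def normalize_layer_slug(raw_slug: str) -> str: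
--     """Normalize a `layer:` slug into kebab-case: one mapping pass, then a
--     separate split/join pass collapses separator runs and trims the edges."""
--     raw = (raw_slug or "").strip().lower()
--     mapped = "".join(ch if ch.isalnum() else " " if ch in " _-" else "" for ch in raw)
--     return "-".join(mapped.split())
--
-- def primary_layer_slug_from_tags(tags):
--     """Return the first `layer:` slug in the original tag order (if any)."""
--     slugs = (normalize_layer_slug(raw.split(":", 1)[1].strip())
--              for raw in ((t or "").strip() for t in tags or [])
--              if raw.lower().startswith("layer:"))
--     return next((s for s in slugs if s), None)
-- ===== Notes on version B (the rewrite author's own statement) =====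
-- stated objective: idiomatic
-- what changed: normalize_layer_slug drops the kebab-case fast-path branch and the prev_dash state machine: each char is mapped in one pass to itself/space/nothing and a separate "-".join(mapped.split()) pass collapses separator runs and trims edges; the outer tag loop becomes a generator pipeline with next().
import Mathlib
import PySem

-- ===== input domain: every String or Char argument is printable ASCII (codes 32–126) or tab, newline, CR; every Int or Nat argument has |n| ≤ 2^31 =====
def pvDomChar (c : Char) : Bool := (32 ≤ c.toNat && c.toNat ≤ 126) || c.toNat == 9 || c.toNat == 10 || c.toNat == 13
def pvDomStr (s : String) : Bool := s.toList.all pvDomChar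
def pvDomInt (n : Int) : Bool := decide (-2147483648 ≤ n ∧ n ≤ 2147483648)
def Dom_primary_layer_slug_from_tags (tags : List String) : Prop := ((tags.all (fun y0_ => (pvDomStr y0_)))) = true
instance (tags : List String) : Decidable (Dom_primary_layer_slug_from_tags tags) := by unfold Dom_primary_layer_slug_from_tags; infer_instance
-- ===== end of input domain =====

-- B replaces normalize_layer_slug's kebab fast-path + prev_dash state machine by one
-- char-mapping pass followed by a separate split()/join collapse pass, and expresses the
-- outer scan as first-match over a mapped/filtered sequence (objective: idiomatic).

-- ===== PORT A =====
-- normalize_layer_slug, transliterated (fast path, then the prev_dash loop)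
def pvNormA (raw_slug : List Char) : List Char :=
  let raw := PySem.Chars.lower (PySem.Chars.strip raw_slug)
  if raw = [] then []
  else if PySem.Chars.strIsalnum (PySem.Chars.replace raw ['-'] []) &&
          !(PySem.Chars.isIn ['-', '-'] raw) &&
          !(PySem.Chars.startswith raw ['-']) &&
          !(PySem.Chars.endswith raw ['-']) then raw
  else
    let st := raw.foldl (fun (st : List Char × Bool) ch =>
      if PySem.Chars.isalnum ch then (st.1 ++ [ch], false)
      else if ch = ' ' ∨ ch = '_' ∨ ch = '-' then
        (if !st.2 && !st.1.isEmpty then (st.1 ++ ['-'], true) else st)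
      else st) ([], false)
    PySem.Chars.stripChars st.1 ['-']

-- the for-loop with early return; `t or ""` is the identity on a str argument.
-- raw.split(":", 1)[1] is only evaluated under the startswith guard, so ':' occurs and
-- index 1 exists; getD's default is never used there.
def pvLoopA : List String → Option String
  | [] => none
  | t :: rest =>
    let raw := PySem.Chars.strip t.toList
    if PySem.Chars.startswith (PySem.Chars.lower raw) ("layer:".toList) then
      let slug := pvNormA (PySem.Chars.strip ((PySem.Chars.splitOnMax raw [':'] 1).getD 1 []))
      if slug.isEmpty then pvLoopA rest else some (String.ofList slug)
    else pvLoopA rest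

def primary_layer_slug_from_tags (tags : List String) : Option String :=
  pvLoopA tags

-- ===== PORT B =====
-- normalize_layer_slug, rewritten: map each char, then "-".join(mapped.split())
def pvNormB (raw_slug : List Char) : List Char :=
  let raw := PySem.Chars.lower (PySem.Chars.strip raw_slug)
  let mapped := raw.flatMap (fun ch =>
    if PySem.Chars.isalnum ch then [ch]
    else if ch = ' ' ∨ ch = '_' ∨ ch = '-' then [' ']
    else [])
  PySem.Chars.join ['-'] (PySem.Chars.split₀ mapped)

-- generator pipeline + next(...): filterMap the tags, take the first truthy slug
def primary_layer_slug_from_tags_alt (tags : List String) : Option String :=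
  let slugs := tags.filterMap (fun t =>
    let raw := PySem.Chars.strip t.toList
    if PySem.Chars.startswith (PySem.Chars.lower raw) ("layer:".toList) then
      some (pvNormB (PySem.Chars.strip ((PySem.Chars.splitOnMax raw [':'] 1).getD 1 [])))
    else none)
  (slugs.find? (fun s => !s.isEmpty)).map String.ofList

-- ===== PRECONDITION & SPEC =====
def Spec_primary_layer_slug_from_tags (tags : List String) (out : Option String) : Prop := out = primary_layer_slug_from_tags_alt tags
instance (tags : List String) (out : Option String) : Decidable (Spec_primary_layer_slug_from_tags tags out) := by unfold Spec_primary_layer_slug_from_tags; infer_instance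

-- ===== CLAIM (what is proved, stated in full; the proofs are below) =====
def Claim_equal_primary_layer_slug_from_tags : Prop := ∀ (tags : List String), Dom_primary_layer_slug_from_tags tags → Spec_primary_layer_slug_from_tags tags (primary_layer_slug_from_tags tags)

-- ===== LEMMAS AND PROOFS =====

-- A's loop as a two-mode machine: m = true iff output is nonempty and prev_dash is false
def pvAB : Bool → List Char → List Char
  | _, [] => []
  | m, c :: cs =>
    if PySem.Chars.isalnum c then c :: pvAB true cs
    else if (c = ' ' ∨ c = '_' ∨ c = '-') ∧ m = true then '-' :: pvAB false cs
    else pvAB m cs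

-- split() as forward recursion with the current word as accumulator
def pvWords (pre : List Char) : List Char → List (List Char)
  | [] => if pre = [] then [] else [pre]
  | c :: cs =>
    if PySem.Chars.isspace c then
      (if pre = [] then pvWords [] cs else pre :: pvWords [] cs)
    else pvWords (pre ++ [c]) cs


-- character facts
lemma pv_alnum_not_space {c : Char} (h : PySem.Chars.isalnum c = true) :
    PySem.Chars.isspace c = false := by
  simp only [PySem.Chars.isalnum, PySem.Chars.isalpha, PySem.Chars.isdigit, PySem.Chars.isupper,
    PySem.Chars.islower, PySem.Chars.isspace, Bool.or_eq_true, Bool.and_eq_true, decide_eq_true_eq,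
    Char.le_def, UInt32.le_iff_toNat_le, Char.toNat, Bool.or_eq_false_iff, Bool.and_eq_false_iff,
    decide_eq_false_iff_not, not_le,
    show ('0' : Char).val.toNat = 48 from rfl, show ('9' : Char).val.toNat = 57 from rfl,
    show ('A' : Char).val.toNat = 65 from rfl, show ('Z' : Char).val.toNat = 90 from rfl,
    show ('a' : Char).val.toNat = 97 from rfl, show ('z' : Char).val.toNat = 122 from rfl] at h ⊢
  omega

lemma pv_alnum_ne_dash {c : Char} (h : PySem.Chars.isalnum c = true) : c ≠ '-' := by
  rintro rfl
  simp [PySem.Chars.isalnum, PySem.Chars.isalpha, PySem.Chars.isdigit,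
    PySem.Chars.isupper, PySem.Chars.islower] at h

-- split₀.go characterised by pvWords
lemma pv_go_eq (ms : List Char) : ∀ cur acc,
    PySem.Chars.split₀.go ms cur acc = acc.reverse ++ pvWords cur.reverse ms := by
  induction ms with
  | nil =>
    intro cur acc
    by_cases hc : cur = [] <;> simp [PySem.Chars.split₀.go, pvWords, hc]
  | cons c rest ih =>
    intro cur acc
    by_cases hs : PySem.Chars.isspace c
    · by_cases hc : cur = [] <;> simp [PySem.Chars.split₀.go, hs, hc, pvWords, ih]
    · simpa [PySem.Chars.split₀.go, hs, pvWords] using ih (c :: cur) acc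

-- A's foldl computes pvAB
lemma pv_foldl_eq (cs : List Char) : ∀ (out : List Char) (pd : Bool), (out = [] → pd = false) →
    (cs.foldl (fun (st : List Char × Bool) ch =>
      if PySem.Chars.isalnum ch then (st.1 ++ [ch], false)
      else if ch = ' ' ∨ ch = '_' ∨ ch = '-' then
        (if !st.2 && !st.1.isEmpty then (st.1 ++ ['-'], true) else st)
      else st) (out, pd)).1 = out ++ pvAB (!out.isEmpty && !pd) cs := by
  induction cs with
  | nil => intro out pd h; simp [pvAB]
  | cons c cs ih =>
    intro out pd h
    simp only [List.foldl_cons]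
    by_cases ha : PySem.Chars.isalnum c
    · rw [if_pos ha, ih (out ++ [c]) false (by simp)]
      have h1 : (out ++ [c]).isEmpty = false := by simp
      simp [pvAB, ha, h1]
    · rw [if_neg ha]
      by_cases hsep : c = ' ' ∨ c = '_' ∨ c = '-'
      · rw [if_pos hsep]
        by_cases hm : (!pd && !out.isEmpty) = true
        · rw [if_pos hm, ih (out ++ ['-']) true (by simp)]
          have h1 : pd = false ∧ out.isEmpty = false := by
            simpa [Bool.and_eq_true, Bool.not_eq_true'] using hm
          have h2 : (out ++ ['-']).isEmpty = false := by simp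
          simp [pvAB, ha, hsep, h1.1, h1.2, h2]
        · rw [if_neg hm, ih out pd h]
          have hmf : (!out.isEmpty && !pd) = false := by
            cases pd <;> cases hout : out.isEmpty <;> simp_all
          simp [pvAB, ha, hsep, hmf]
      · rw [if_neg hsep, ih out pd h]
        simp [pvAB, ha, hsep]

-- junk chars are invisible to the machine: pvAB only sees the mapped string
lemma pv_AB_flatMap (cs : List Char) : ∀ m,
    pvAB m (cs.flatMap (fun ch =>
      if PySem.Chars.isalnum ch then [ch]
      else if ch = ' ' ∨ ch = '_' ∨ ch = '-' then [' ']
      else [])) = pvAB m cs := by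
  induction cs with
  | nil => intro m; rfl
  | cons c cs ih =>
    intro m
    by_cases ha : PySem.Chars.isalnum c
    · simp [ha, pvAB, ih]
    · by_cases hsep : c = ' ' ∨ c = '_' ∨ c = '-'
      · cases m <;> simp [ha, hsep, pvAB, ih, show PySem.Chars.isalnum ' ' = false from by decide]
      · simp [ha, hsep, pvAB, ih]

def pvOk (ms : List Char) : Prop := ∀ c ∈ ms, PySem.Chars.isalnum c = true ∨ c = ' '

lemma pv_mapped_ok (cs : List Char) :
    pvOk (cs.flatMap (fun ch =>
      if PySem.Chars.isalnum ch then [ch]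
      else if ch = ' ' ∨ ch = '_' ∨ ch = '-' then [' ']
      else [])) := by
  intro c hc
  rcases List.mem_flatMap.mp hc with ⟨a, _, hmem⟩
  split_ifs at hmem with h1 h2
  · left; simp at hmem; subst hmem; exact h1
  · right; simpa using hmem
  · simp at hmem

-- stripChars "-" facts
lemma pv_dropDash_eq_self {w : List Char} (h : ∀ a ∈ w.take 1, a ≠ '-') :
    w.dropWhile (fun c => (['-'] : List Char).contains c) = w := by
  cases w with
  | nil => rfl
  | cons a w =>
    have : a ≠ '-' := h a (by simp)
    simp [this]

lemma pv_stripDash_noop {w : List Char} (h1 : ∀ a ∈ w.take 1, a ≠ '-')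
    (h2 : ∀ a ∈ w.reverse.take 1, a ≠ '-') :
    PySem.Chars.stripChars w ['-'] = w := by
  simp only [PySem.Chars.stripChars]
  rw [pv_dropDash_eq_self h1, pv_dropDash_eq_self h2, List.reverse_reverse]

lemma pv_stripDash_eq_self {w : List Char} (h : ∀ a ∈ w, a ≠ '-') :
    PySem.Chars.stripChars w ['-'] = w := by
  refine pv_stripDash_noop (fun a ha => h a (List.mem_of_mem_take ha))
    (fun a ha => h a (by simpa using List.mem_of_mem_take ha))

lemma pv_dropDash_all {w : List Char} (h : ∀ a ∈ w, a ≠ '-') :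
    w.dropWhile (fun c => (['-'] : List Char).contains c) = w := by
  induction w with
  | nil => rfl
  | cons a w ih =>
    have ha : a ≠ '-' := h a (by simp)
    simp only [List.dropWhile_cons, List.contains_cons, beq_iff_eq, ha, List.contains_nil,
      Bool.or_false, if_false]

lemma pv_stripDash_append {pre X : List Char} (hpre : pre ≠ []) (hpd : ∀ a ∈ pre, a ≠ '-')
    (hX : X ≠ []) (hXh : ∀ c ∈ X.take 1, c ≠ '-') :
    PySem.Chars.stripChars (pre ++ '-' :: X) ['-'] = pre ++ '-' :: PySem.Chars.stripChars X ['-'] := by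
  simp only [PySem.Chars.stripChars]
  have hp1 : ∀ a ∈ (pre ++ '-' :: X).take 1, a ≠ '-' := by
    obtain ⟨x, l, rfl⟩ := List.exists_cons_of_ne_nil hpre
    intro a ha
    simp only [List.cons_append, List.take_succ_cons, List.take_zero, List.mem_singleton] at ha
    rw [ha]; exact hpd _ (by simp)
  rw [pv_dropDash_eq_self hp1, pv_dropDash_eq_self hXh]
  rw [show (pre ++ '-' :: X).reverse = X.reverse ++ ('-' :: pre.reverse) from by simp]
  rw [List.dropWhile_append]
  have hXr : (X.reverse.dropWhile (fun c => (['-'] : List Char).contains c)).isEmpty = false := by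
    obtain ⟨x, X', rfl⟩ := List.exists_cons_of_ne_nil hX
    have hx : x ≠ '-' := hXh x (by simp)
    rw [List.isEmpty_eq_false_iff, Ne, List.dropWhile_eq_nil_iff]
    push Not
    exact ⟨x, by simp, by simp [hx]⟩
  rw [if_neg (show ¬((X.reverse.dropWhile (fun c => (['-'] : List Char).contains c)).isEmpty = true) from by
    rw [hXr]; simp)]
  simp

lemma pv_stripDash_append_nil {pre : List Char} (hpre : pre ≠ []) (hpd : ∀ a ∈ pre, a ≠ '-') :
    PySem.Chars.stripChars (pre ++ ['-']) ['-'] = pre := by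
  simp only [PySem.Chars.stripChars]
  have hp1 : ∀ a ∈ (pre ++ ['-']).take 1, a ≠ '-' := by
    obtain ⟨x, l, rfl⟩ := List.exists_cons_of_ne_nil hpre
    intro a ha
    simp only [List.cons_append, List.take_succ_cons, List.take_zero, List.mem_singleton] at ha
    rw [ha]; exact hpd _ (by simp)
  rw [pv_dropDash_eq_self hp1]
  rw [show (pre ++ ['-']).reverse = '-' :: pre.reverse from by simp]
  rw [show List.dropWhile (fun c => (['-'] : List Char).contains c) ('-' :: pre.reverse)
        = List.dropWhile (fun c => (['-'] : List Char).contains c) pre.reverse from by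
      simp]
  rw [pv_dropDash_all (by intro a ha; exact hpd a (by simpa using ha))]
  simp

-- nonemptiness / head shape of the machine output
lemma pv_words_ne_nil (ms : List Char) : ∀ pre, pre ≠ [] → pvWords pre ms ≠ [] := by
  induction ms with
  | nil => intro pre h; simp [pvWords, h]
  | cons c cs ih =>
    intro pre h
    by_cases hs : PySem.Chars.isspace c
    · simp [pvWords, hs, h]
    · simp only [pvWords, hs, Bool.false_eq_true, if_false]
      exact ih (pre ++ [c]) (by simp)

lemma pv_AB_false_head (ms : List Char) (hok : pvOk ms) :
    (pvAB false ms = [] ↔ pvWords [] ms = []) ∧ (∀ c ∈ (pvAB false ms).take 1, PySem.Chars.isalnum c = true) := by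
  induction ms with
  | nil => simp [pvAB, pvWords]
  | cons c cs ih =>
    have hok' : pvOk cs := fun a ha => hok a (List.mem_cons_of_mem _ ha)
    rcases hok c (by simp) with ha | ha
    · constructor
      · simp [pvAB, pvWords, ha, pv_alnum_not_space ha]
        exact pv_words_ne_nil cs [c] (by simp)
      · intro d hd
        simp [pvAB, ha] at hd
        subst hd; exact ha
    · subst ha
      have hs : PySem.Chars.isspace ' ' = true := by decide
      have hna : PySem.Chars.isalnum ' ' = false := by decide
      constructor
      · simpa [pvAB, pvWords, hs, hna] using (ih hok').1
      · simpa [pvAB, hs, hna] using (ih hok').2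

-- the central lemma: machine output (dash-stripped) = "-".join(split())
lemma pv_join_cons_cons (a b : List Char) (l : List (List Char)) :
    PySem.Chars.join ['-'] (a :: b :: l) = a ++ '-' :: PySem.Chars.join ['-'] (b :: l) := by
  simp [PySem.Chars.join, List.intercalate, List.intersperse]

lemma pv_main (ms : List Char) (hok : pvOk ms) :
    PySem.Chars.stripChars (pvAB false ms) ['-'] = PySem.Chars.join ['-'] (pvWords [] ms) ∧
    (∀ pre, pre ≠ [] → (∀ a ∈ pre, PySem.Chars.isalnum a = true) →
      PySem.Chars.stripChars (pre ++ pvAB true ms) ['-'] = PySem.Chars.join ['-'] (pvWords pre ms)) := by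
  induction ms with
  | nil =>
    constructor
    · simp [pvAB, pvWords, PySem.Chars.stripChars, PySem.Chars.join, List.intercalate]
    · intro pre hpre hall
      simp only [pvAB, pvWords, List.append_nil, if_neg hpre]
      rw [pv_stripDash_eq_self (fun a ha => pv_alnum_ne_dash (hall a ha))]
      simp [PySem.Chars.join, List.intercalate]
  | cons c cs ih =>
    have hok' : pvOk cs := fun a ha => hok a (List.mem_cons_of_mem _ ha)
    rcases hok c (by simp) with ha | ha
    · have hns : PySem.Chars.isspace c = false := pv_alnum_not_space ha
      constructor
      · rw [show pvAB false (c :: cs) = c :: pvAB true cs from by simp [pvAB, ha]]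
        rw [show pvWords [] (c :: cs) = pvWords [c] cs from by simp [pvWords, hns]]
        rw [show (c :: pvAB true cs) = [c] ++ pvAB true cs from rfl]
        exact (ih hok').2 [c] (by simp) (by simpa using ha)
      · intro pre hpre hall
        rw [show pvAB true (c :: cs) = c :: pvAB true cs from by simp [pvAB, ha]]
        rw [show pvWords pre (c :: cs) = pvWords (pre ++ [c]) cs from by simp [pvWords, hns]]
        rw [show pre ++ c :: pvAB true cs = (pre ++ [c]) ++ pvAB true cs from by simp]
        refine (ih hok').2 (pre ++ [c]) (by simp) ?_
        intro a haa
        rcases List.mem_append.mp haa with h | h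
        · exact hall a h
        · simpa [List.mem_singleton.mp h] using ha
    · subst ha
      have hs : PySem.Chars.isspace ' ' = true := by decide
      have hna : PySem.Chars.isalnum ' ' = false := by decide
      constructor
      · rw [show pvAB false (' ' :: cs) = pvAB false cs from by simp [pvAB, hna]]
        rw [show pvWords [] (' ' :: cs) = pvWords [] cs from by simp [pvWords, hs]]
        exact (ih hok').1
      · intro pre hpre hall
        rw [show pvAB true (' ' :: cs) = '-' :: pvAB false cs from by simp [pvAB, hna]]
        rw [show pvWords pre (' ' :: cs) = pre :: pvWords [] cs from by simp [pvWords, hs, hpre]]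
        have hdash : ∀ a ∈ pre, a ≠ '-' := fun a haa => pv_alnum_ne_dash (hall a haa)
        by_cases hW : pvWords [] cs = []
        · have hXnil : pvAB false cs = [] := (pv_AB_false_head cs hok').1.mpr hW
          rw [hXnil, hW]
          rw [show pre ++ ['-'] = pre ++ ['-'] from rfl]
          rw [pv_stripDash_append_nil hpre hdash]
          simp [PySem.Chars.join, List.intercalate]
        · have hXne : pvAB false cs ≠ [] := fun hh => hW ((pv_AB_false_head cs hok').1.mp hh)
          have hXh : ∀ a ∈ (pvAB false cs).take 1, a ≠ '-' :=
            fun a haa => pv_alnum_ne_dash ((pv_AB_false_head cs hok').2 a haa)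
          rw [pv_stripDash_append hpre hdash hXne hXh, (ih hok').1]
          obtain ⟨w, ws, hws⟩ := List.exists_cons_of_ne_nil hW
          rw [hws, pv_join_cons_cons]

-- replace(raw, "-", "") is filter (· ≠ '-')
lemma pv_replace_go (fuel : Nat) : ∀ (l acc : List Char), l.length ≤ fuel →
    PySem.Chars.replace.go ['-'] [] fuel l acc = acc.reverse ++ l.filter (fun c => c ≠ '-') := by
  induction fuel with
  | zero =>
    intro l acc h
    have : l = [] := List.eq_nil_of_length_eq_zero (Nat.le_zero.mp h)
    subst this; simp [PySem.Chars.replace.go]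
  | succ fuel ih =>
    intro l acc h
    cases l with
    | nil => simp [PySem.Chars.replace.go]
    | cons c t =>
      by_cases hc : c = '-'
      · subst hc
        rw [show PySem.Chars.replace.go ['-'] [] (fuel + 1) ('-' :: t) acc
              = PySem.Chars.replace.go ['-'] [] fuel t acc from by
            simp [PySem.Chars.replace.go, List.isPrefixOf]]
        rw [ih t acc (by simpa using Nat.lt_succ_iff.mp (Nat.lt_of_lt_of_le (by simp) h))]
        simp
      · rw [show PySem.Chars.replace.go ['-'] [] (fuel + 1) (c :: t) acc
              = PySem.Chars.replace.go ['-'] [] fuel t (c :: acc) from by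
            simp [PySem.Chars.replace.go, List.isPrefixOf, Ne.symm hc]]
        rw [ih t (c :: acc) (by simpa using Nat.lt_succ_iff.mp (Nat.lt_of_lt_of_le (by simp) h))]
        simp [hc]

lemma pv_replace_dash (raw : List Char) :
    PySem.Chars.replace raw ['-'] [] = raw.filter (fun c => c ≠ '-') := by
  rw [show PySem.Chars.replace raw ['-'] [] = PySem.Chars.replace.go ['-'] [] raw.length raw [] from by
    simp [PySem.Chars.replace]]
  simpa using pv_replace_go raw.length raw [] le_rfl

-- fast path: on an already-kebab string the machine is the identity
lemma pv_take1_append {l : List Char} {c : Char} (h : l ≠ []) :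
    (l ++ [c]).take 1 = l.take 1 := by
  obtain ⟨x, t, rfl⟩ := List.exists_cons_of_ne_nil h; simp

lemma pv_AB_fast (raw : List Char) (hch : ∀ c ∈ raw, PySem.Chars.isalnum c = true ∨ c = '-')
    (hinf : ¬ ['-', '-'] <:+: raw) (hlast : ∀ c ∈ raw.reverse.take 1, c ≠ '-') :
    pvAB true raw = raw ∧ ((∀ c ∈ raw.take 1, c ≠ '-') → pvAB false raw = raw) := by
  induction raw with
  | nil => simp [pvAB]
  | cons c cs ih =>
    have hinf' : ¬ ['-', '-'] <:+: cs := fun h => hinf (h.trans (List.suffix_cons c cs).isInfix)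
    have hlast' : ∀ a ∈ cs.reverse.take 1, a ≠ '-' := by
      intro a haa
      have hne : cs ≠ [] := by rintro rfl; simp at haa
      exact hlast a (by
        rw [List.reverse_cons, pv_take1_append (by simp [hne])]; exact haa)
    have hcs := ih (fun a haa => hch a (List.mem_cons_of_mem _ haa)) hinf' hlast'
    rcases hch c (by simp) with ha | ha
    · constructor
      · rw [show pvAB true (c :: cs) = c :: pvAB true cs from by simp [pvAB, ha], hcs.1]
      · intro _
        rw [show pvAB false (c :: cs) = c :: pvAB true cs from by simp [pvAB, ha], hcs.1]
    · subst ha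
      have hna : PySem.Chars.isalnum '-' = false := by decide
      have hcsne : cs ≠ [] := by
        rintro rfl
        exact hlast '-' (by simp) rfl
      have hhd : ∀ a ∈ cs.take 1, a ≠ '-' := by
        intro a haa hdd
        obtain ⟨x, l, hx⟩ := List.exists_cons_of_ne_nil hcsne
        rw [hx] at haa
        simp at haa
        apply hinf
        rw [hx, show x = '-' from haa.symm.trans hdd]
        exact ⟨[], l, by simp⟩
      constructor
      · rw [show pvAB true ('-' :: cs) = '-' :: pvAB false cs from by simp [pvAB, hna]]
        rw [hcs.2 hhd]
      · intro hhd0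
        exact absurd rfl (hhd0 '-' (by simp))

-- normalisation agrees
lemma pv_norm_eq (cs : List Char) : pvNormA cs = pvNormB cs := by
  unfold pvNormA pvNormB
  set raw := PySem.Chars.lower (PySem.Chars.strip cs) with hraw
  set mapped := raw.flatMap (fun ch =>
    if PySem.Chars.isalnum ch then [ch]
    else if ch = ' ' ∨ ch = '_' ∨ ch = '-' then [' ']
    else []) with hmapped
  have hB : PySem.Chars.join ['-'] (PySem.Chars.split₀ mapped)
      = PySem.Chars.stripChars (pvAB false raw) ['-'] := by
    rw [PySem.Chars.split₀, pv_go_eq mapped [] []]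
    simp only [List.reverse_nil, List.nil_append]
    rw [← (pv_main mapped (pv_mapped_ok raw)).1, hmapped, pv_AB_flatMap raw false]
  by_cases h0 : raw = []
  · rw [if_pos h0, hB, h0]
    simp [pvAB, PySem.Chars.stripChars]
  · rw [if_neg h0, hB]
    by_cases hfast : (PySem.Chars.strIsalnum (PySem.Chars.replace raw ['-'] []) &&
          !(PySem.Chars.isIn ['-', '-'] raw) &&
          !(PySem.Chars.startswith raw ['-']) &&
          !(PySem.Chars.endswith raw ['-'])) = true
    · rw [if_pos hfast]
      simp only [Bool.and_eq_true, Bool.not_eq_true'] at hfast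
      obtain ⟨⟨⟨hal, hii⟩, hsw⟩, hew⟩ := hfast
      rw [pv_replace_dash] at hal
      simp only [PySem.Chars.strIsalnum, Bool.and_eq_true, List.all_eq_true] at hal
      have hch : ∀ c ∈ raw, PySem.Chars.isalnum c = true ∨ c = '-' := by
        intro c hc
        by_cases hcd : c = '-'
        · exact Or.inr hcd
        · exact Or.inl (hal.2 c (List.mem_filter.mpr ⟨hc, by simp [hcd]⟩))
      have hinf : ¬ ['-', '-'] <:+: raw := (PySem.Chars.isIn_eq_false_iff _ _).mp hii
      have hhd : ∀ c ∈ raw.take 1, c ≠ '-' := by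
        intro a haa hdd
        obtain ⟨x, l, hx⟩ := List.exists_cons_of_ne_nil h0
        rw [hx] at haa
        simp at haa
        have hx' : raw = '-' :: l := by rw [hx, show x = '-' from haa.symm.trans hdd]
        rw [hx'] at hsw
        simp [PySem.Chars.startswith, List.isPrefixOf] at hsw
      have hlast : ∀ c ∈ raw.reverse.take 1, c ≠ '-' := by
        intro a haa hdd
        obtain ⟨x, l, hx⟩ := List.exists_cons_of_ne_nil (show raw.reverse ≠ [] from by simp [h0])
        rw [hx] at haa
        simp at haa
        have hx2 : raw = l.reverse ++ ['-'] := by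
          have h3 := congrArg List.reverse hx
          simpa [show x = '-' from haa.symm.trans hdd] using h3
        rw [hx2] at hew
        have htrue : (['-'] : List Char).isSuffixOf (l.reverse ++ ['-']) = true := by
          rw [List.isSuffixOf_iff_suffix]; exact ⟨l.reverse, rfl⟩
        rw [show PySem.Chars.endswith (l.reverse ++ ['-']) ['-']
              = (['-'] : List Char).isSuffixOf (l.reverse ++ ['-']) from rfl, htrue] at hew
        simp at hew
      rw [(pv_AB_fast raw hch hinf hlast).2 hhd]
      exact (pv_stripDash_noop hhd hlast).symm
    · rw [if_neg hfast]
      show PySem.Chars.stripChars (List.foldl _ ([], false) raw).1 ['-']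
          = PySem.Chars.stripChars (pvAB false raw) ['-']
      rw [pv_foldl_eq raw [] false (fun _ => rfl)]
      simp

-- A's outer loop equals B's filterMap/find? pipeline
lemma pv_outer (tags : List String) : pvLoopA tags = primary_layer_slug_from_tags_alt tags := by
  induction tags with
  | nil => rfl
  | cons t rest ih =>
    unfold pvLoopA primary_layer_slug_from_tags_alt
    unfold primary_layer_slug_from_tags_alt at ih
    simp only [List.filterMap_cons]
    by_cases hc : PySem.Chars.startswith
        (PySem.Chars.lower (PySem.Chars.strip t.toList)) ("layer:".toList) = true
    · rw [if_pos hc, if_pos hc]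
      rw [pv_norm_eq]
      set slug := pvNormB (PySem.Chars.strip
        ((PySem.Chars.splitOnMax (PySem.Chars.strip t.toList) [':'] 1).getD 1 [])) with hslug
      by_cases he : slug.isEmpty = true
      · rw [if_pos he, ih]
        simp [he]
      · rw [if_neg he]
        simp [he]
    · rw [if_neg hc, if_neg hc, ih]

-- ===== VERDICT (by name: the statement is the Claim_ definition above) =====
theorem primary_layer_slug_from_tags_spec : Claim_equal_primary_layer_slug_from_tags := by
  intro tags _
  exact pv_outer tags
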